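-- pv_equiv track=rewrite | github.com/NavchetanKaur/local_tool | extras/ancillary_funcs_safe2.py | split_gl_string_per_locus
-- ===== SOURCE A (Python) =====
-- def split_gl_string_per_locus(gl_string):
-- 	a_string = ""
-- 	b_string = ""
-- 	c_string = ""
-- 	dr_string = ""
-- 	dq_string = ""
--
-- 	gl_string_split = gl_string.split("^")
--
-- 	for string in gl_string_split:
-- 		if string.startswith("A"):
-- 			a_string = string.replace("+", " + ")
-- 			a_string = a_string.replace("/", "/ ")
--
-- 		if string.startswith("B"):
-- 			b_string = string.replace("+", " + ")
-- 			b_string = b_string.replace("/", "/ ")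
--
-- 		if string.startswith("C"):
-- 			c_string = string.replace("+", " + ")
-- 			c_string = c_string.replace("/", "/ ")
--
-- 		if string.startswith("DR"):
-- 			dr_string = string.replace("+", " + ")
-- 			dr_string = dr_string.replace("/", "/ ")
--
-- 		if string.startswith("DQ"):
-- 			dq_string = string.replace("+", " + ")
-- 			dq_string = dq_string.replace("/", "/ ")
--
--
--
-- 	string_list = [a_string] + [b_string] + [c_string] + [dr_string] + [dq_string]
--
-- 	return string_list
-- ===== SOURCE B (Python) =====
-- def split_gl_string_per_locus(gl_string):
-- 	def fmt(s):
-- 		return s.replace("+", " + ").replace("/", "/ ")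
-- 	parts = gl_string.split("^")
-- 	result = []
-- 	for code in ["A", "B", "C", "DR", "DQ"]:
-- 		slot = ""
-- 		for part in parts:
-- 			if part.startswith(code):
-- 				slot = fmt(part)
-- 		result.append(slot)
-- 	return result
-- ===== Notes on version B (the rewrite author's own statement) =====
-- stated objective: simpler
-- what changed: Replaces A's five named accumulator variables and five inline guard blocks with a code-outer/part-inner nested loop over the fixed locus prefixes, each slot taking the last matching part through one shared fmt helper.
import Mathlib
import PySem

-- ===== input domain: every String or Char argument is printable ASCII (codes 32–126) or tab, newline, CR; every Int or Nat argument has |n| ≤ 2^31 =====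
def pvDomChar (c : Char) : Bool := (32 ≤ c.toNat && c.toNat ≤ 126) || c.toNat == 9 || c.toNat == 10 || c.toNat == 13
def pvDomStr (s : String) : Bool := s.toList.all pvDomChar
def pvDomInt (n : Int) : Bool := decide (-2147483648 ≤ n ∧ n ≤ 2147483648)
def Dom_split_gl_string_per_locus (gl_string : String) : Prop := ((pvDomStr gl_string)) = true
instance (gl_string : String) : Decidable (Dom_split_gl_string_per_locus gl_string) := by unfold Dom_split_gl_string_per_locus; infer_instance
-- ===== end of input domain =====

-- B inverts the loop nesting: an outer loop over the fixed locus codes with an inner last-match scan and a shared fmt helper, replacing A's five accumulator variables and inline guard blocks (objective: simpler).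
-- ===== PORT A =====
-- step of A's single pass over the '^'-parts: five guard blocks, each doing the two replaces
def pvStepA (st : String × String × String × String × String) (s : String) :
    String × String × String × String × String :=
  let a := if PySem.Str.startswith s "A" then
      PySem.Str.replace (PySem.Str.replace s "+" " + ") "/" "/ " else st.1
  let b := if PySem.Str.startswith s "B" then
      PySem.Str.replace (PySem.Str.replace s "+" " + ") "/" "/ " else st.2.1
  let c := if PySem.Str.startswith s "C" then
      PySem.Str.replace (PySem.Str.replace s "+" " + ") "/" "/ " else st.2.2.1
  let dr := if PySem.Str.startswith s "DR" then
      PySem.Str.replace (PySem.Str.replace s "+" " + ") "/" "/ " else st.2.2.2.1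
  let dq := if PySem.Str.startswith s "DQ" then
      PySem.Str.replace (PySem.Str.replace s "+" " + ") "/" "/ " else st.2.2.2.2
  (a, b, c, dr, dq)

def split_gl_string_per_locus (gl_string : String) : List String :=
  let st := ((PySem.Str.split? gl_string "^").getD []).foldl pvStepA ("", "", "", "", "")
  [st.1] ++ [st.2.1] ++ [st.2.2.1] ++ [st.2.2.2.1] ++ [st.2.2.2.2]

-- ===== PORT B =====
-- B: fmt helper, then code-outer / part-inner loops, last match wins per slot
def pvFmt (s : String) : String :=
  PySem.Str.replace (PySem.Str.replace s "+" " + ") "/" "/ "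

def pvSlot (parts : List String) (code : String) : String :=
  parts.foldl (fun slot part => if PySem.Str.startswith part code then pvFmt part else slot) ""

def split_gl_string_per_locus_alt (gl_string : String) : List String :=
  let parts := (PySem.Str.split? gl_string "^").getD []
  ["A", "B", "C", "DR", "DQ"].foldl (fun result code => result ++ [pvSlot parts code]) []

-- ===== PRECONDITION & SPEC =====
def Spec_split_gl_string_per_locus (gl_string : String) (out : List String) : Prop := out = split_gl_string_per_locus_alt gl_string
instance (gl_string : String) (out : List String) : Decidable (Spec_split_gl_string_per_locus gl_string out) := by unfold Spec_split_gl_string_per_locus; infer_instance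

-- ===== CLAIM (what is proved, stated in full; the proofs are below) =====
def Claim_equal_split_gl_string_per_locus : Prop := ∀ (gl_string : String), Dom_split_gl_string_per_locus gl_string → Spec_split_gl_string_per_locus gl_string (split_gl_string_per_locus gl_string)

-- ===== LEMMAS AND PROOFS =====

-- ===== VERDICT (by name: the statement is the Claim_ definition above) =====
-- g code init: last matching part formatted, starting from init
def pvSlotFrom (parts : List String) (code : String) (init : String) : String :=
  parts.foldl (fun slot part => if PySem.Str.startswith part code then pvFmt part else slot) init

lemma pvFoldA_eq (parts : List String) (a b c dr dq : String) :
    parts.foldl pvStepA (a, b, c, dr, dq) =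
      (pvSlotFrom parts "A" a, pvSlotFrom parts "B" b, pvSlotFrom parts "C" c,
       pvSlotFrom parts "DR" dr, pvSlotFrom parts "DQ" dq) := by
  induction parts generalizing a b c dr dq with
  | nil => rfl
  | cons p ps ih =>
      simp only [List.foldl_cons, pvSlotFrom, pvStepA, pvFmt]
      exact ih _ _ _ _ _

theorem split_gl_string_per_locus_spec : Claim_equal_split_gl_string_per_locus := by
  intro gl_string _
  unfold Spec_split_gl_string_per_locus split_gl_string_per_locus split_gl_string_per_locus_alt
  simp only [pvFoldA_eq]
  rfl
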